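-- pv_equiv track=rewrite | github.com/kim-do-hyeon/Algorithm | 프로그래머스/1/172928. 공원 산책/공원 산책.py | solution
-- ===== SOURCE A (Python) =====
-- def solution(park, routes):
--     for i in range(len(park)) :
--         for j in range(len(park[i])) :
--             if park[i][j] == "S" :
--                 x, y = i, j
--                 break
--
--     max_x = len(park)
--     max_y = len(park[0])
--
--     for i in routes :
--         direction, block = i.split(" ")
--         block = int(block)
--         valid = True
--
--         for j in range(1, block + 1) :
--             if direction == "E" :
--                 new_x, new_y = x, y + j
--             elif direction == "W" :
--                 new_x, new_y = x, y - j
--             elif direction == "S" :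
--                 new_x, new_y = x + j, y
--             elif direction == "N" :
--                 new_x, new_y = x - j, y
--
--             if not (0 <= new_x < max_x and 0 <= new_y < max_y) :
--                 valid = False
--                 break
--
--             if park[new_x][new_y] == "X" :
--                 valid = False
--                 break
--
--         if valid :
--             if direction == "E" :
--                 y += block
--             elif direction == "W" :
--                 y -= block
--             elif direction == "S" :
--                 x += block
--             elif direction == "N" :
--                 x -= block
--
--     return [x, y]
-- ===== SOURCE B (Python) =====
-- def solution(park, routes):
--     R, C = len(park), len(park[0])
--     x = y = 0
--     for i, row in enumerate(park):
--         j = row.find('S')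
--         if j != -1:
--             x, y = i, j
--
--     def prefix(seq):
--         acc = [0]
--         t = 0
--         for ch in seq:
--             t += (ch == 'X')
--             acc.append(t)
--         return acc
--
--     # O(1) obstacle test per move: prefix counts of 'X' along every row and
--     # (via transposition) every column, built once up front.
--     rowpre = [prefix(row) for row in park]
--     colpre = [prefix(col) for col in zip(*park)]
--
--     delta = {'E': (0, 1), 'W': (0, -1), 'S': (1, 0), 'N': (-1, 0)}
--     for r in routes:
--         d, n = r.split(' ')
--         n = int(n)
--         dx, dy = delta[d]
--         nx, ny = x + dx * n, y + dy * n
--         if 0 <= nx < R and 0 <= ny < C: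
--             if dx == 0:
--                 a, b = (y + 1, ny + 1) if dy == 1 else (ny, y)
--                 blocked = rowpre[x][b] - rowpre[x][a]
--             else:
--                 a, b = (x + 1, nx + 1) if dx == 1 else (nx, x)
--                 blocked = colpre[y][b] - colpre[y][a]
--             if blocked == 0:
--                 x, y = nx, ny
--     return [x, y]
-- ===== Notes on version B (the rewrite author's own statement) =====
-- stated objective: alternative
-- what changed: B never walks the path of a move at all: it precomputes prefix-count tables of 'X' for every row and (via zip-transposition) every column once, and each route then costs one destination bounds test plus one prefix-count subtraction, so A's per-cell inner scan loop (stepwise bounds check + break + valid flag, repeated four-way if-chains) disappears; the start is found with one str.find per row instead of A's cell-by-cell scan.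
-- outside the precondition, e.g. on solution(['S'], ['E -1']): A returns [0, -1], B returns [0, 0]; on solution(['SO'], ['E 1', 'Q 1']): A returns [0, 1], B raises KeyError
import Mathlib
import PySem

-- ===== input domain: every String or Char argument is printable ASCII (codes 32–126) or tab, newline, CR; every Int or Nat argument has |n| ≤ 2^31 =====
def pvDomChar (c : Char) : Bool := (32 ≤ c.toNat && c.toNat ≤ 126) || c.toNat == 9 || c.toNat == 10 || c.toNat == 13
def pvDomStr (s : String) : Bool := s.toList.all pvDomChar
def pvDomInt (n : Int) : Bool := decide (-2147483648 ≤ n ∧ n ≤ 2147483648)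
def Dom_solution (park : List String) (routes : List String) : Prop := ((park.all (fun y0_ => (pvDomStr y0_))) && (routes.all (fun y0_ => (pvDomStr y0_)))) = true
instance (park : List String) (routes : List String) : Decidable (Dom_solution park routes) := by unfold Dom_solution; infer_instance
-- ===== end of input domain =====

-- B replaces A's per-cell walk along each move by prefix-count tables of 'X' built once
-- per row and per column, so each move is one subtraction (objective: alternative).

-- ===== PORT A =====

-- inner 'for j in range(len(park[i])): if park[i][j] == "S": … break' — first 'S' in the row
def pvFindRowA : List Char → Int → Option Int
  | [], _ => none
  | c :: rest, j => if c = 'S' then some j else pvFindRowA rest (j + 1)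

-- A's outer scan: the inner 'break' does not stop the outer loop, so a later row's 'S' overwrites
def pvFindSA : List String → Int → Option (Int × Int) → Option (Int × Int)
  | [], _, st => st
  | row :: rest, i, st =>
      pvFindSA rest (i + 1)
        (match pvFindRowA row.toList 0 with
         | some j => some (i, j)
         | none => st)

-- 'for j in range(1, block+1)' with the two breaks: block.toNat iterations starting at j = 1
-- (range(1, block+1) is empty for block < 1, exactly as .toNat gives 0 iterations);
-- unknown direction cannot occur inside Pre_
def pvStepA (park : List String) (maxX maxY : Int) (d : String) (x y : Int) :
    Nat → Int → Bool
  | 0, _ => true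
  | fuel + 1, j =>
    let p := if d = "E" then (x, y + j) else if d = "W" then (x, y - j)
             else if d = "S" then (x + j, y) else if d = "N" then (x - j, y) else (x, y)
    if 0 ≤ p.1 ∧ p.1 < maxX ∧ 0 ≤ p.2 ∧ p.2 < maxY then
      match PySem.List.pyGet? park p.1 with
      | some row =>
        match PySem.List.pyGet? row.toList p.2 with
        | some c => if c = 'X' then false else pvStepA park maxX maxY d x y fuel (j + 1)
        | none => false          -- IndexError (ragged park): outside Pre_
      | none => false
    else false

def pvRouteA (park : List String) (maxX maxY : Int) (x y : Int) (r : String) : Int × Int :=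
  match PySem.Str.split? r " " with
  | some [d, bstr] =>
    match PySem.Int.ofStr? bstr with
    | some block =>
      if pvStepA park maxX maxY d x y block.toNat 1 then
        if d = "E" then (x, y + block) else if d = "W" then (x, y - block)
        else if d = "S" then (x + block, y) else if d = "N" then (x - block, y) else (x, y)
      else (x, y)
    | none => (x, y)             -- int(block) raises ValueError: outside Pre_
  | _ => (x, y)                  -- unpacking 'direction, block' raises: outside Pre_

def solution (park : List String) (routes : List String) : List Int :=
  match pvFindSA park 0 none with
  | none => []                   -- no 'S': Python raises NameError, outside Pre_
  | some (x0, y0) =>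
    let maxX : Int := park.length
    let maxY : Int := PySem.Str.len park.headI     -- len(park[0]); park ≠ [] inside Pre_
    let p := routes.foldl (fun (st : Int × Int) r => pvRouteA park maxX maxY st.1 st.2 r) (x0, y0)
    [p.1, p.2]

-- ===== PORT B =====

-- 'j = park[i].find("S"); if j != -1: x, y = i, j' — no break: the last row containing 'S' wins
def pvFindSB : List String → Int → (Int × Int) → (Int × Int)
  | [], _, st => st
  | row :: rest, i, st =>
    let j := PySem.Str.find row "S"
    pvFindSB rest (i + 1) (if j ≠ -1 then (i, j) else st)

-- 'prefix(seq)': acc starts as [0], running total t of (ch == 'X')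
def pvPrefixGo : List Char → Int → List Int
  | [], _ => []
  | c :: rest, t =>
    let t' := t + (if c = 'X' then 1 else 0)
    t' :: pvPrefixGo rest t'

def pvPrefix (cs : List Char) : List Int := 0 :: pvPrefixGo cs 0

-- 'zip(*park)': columns, truncated to the shortest row (exact zip semantics: column j
-- exists iff j < every row's length, so the getD default ' ' is never read)
def pvTranspose (rows : List (List Char)) : List (List Char) :=
  match rows with
  | [] => []
  | r0 :: rest =>
    let m := rest.foldl (fun acc r => min acc r.length) r0.length
    (List.range m).map (fun j => (r0 :: rest).map (fun r => r.getD j ' '))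

def pvDelta : PySem.Dict String (Int × Int) :=
  ((((PySem.Dict.empty).insert "E" (0, 1)).insert "W" (0, -1)).insert "S" (1, 0)).insert "N" (-1, 0)

def pvRouteB (rowpre colpre : List (List Int)) (rows cols : Int) (x y : Int) (r : String) :
    Int × Int :=
  match PySem.Str.split? r " " with
  | some [d, nstr] =>
    match PySem.Int.ofStr? nstr with
    | some n =>
      match PySem.Dict.get? pvDelta d with
      | some dxy =>
        let nx := x + dxy.1 * n
        let ny := y + dxy.2 * n
        if 0 ≤ nx ∧ nx < rows ∧ 0 ≤ ny ∧ ny < cols then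
          let blocked : Int :=
            if dxy.1 = 0 then
              let ab := if dxy.2 = 1 then (y + 1, ny + 1) else (ny, y)
              PySem.List.pyGetD (PySem.List.pyGetD rowpre x []) ab.2 0 -
                PySem.List.pyGetD (PySem.List.pyGetD rowpre x []) ab.1 0
            else
              let ab := if dxy.1 = 1 then (x + 1, nx + 1) else (nx, x)
              PySem.List.pyGetD (PySem.List.pyGetD colpre y []) ab.2 0 -
                PySem.List.pyGetD (PySem.List.pyGetD colpre y []) ab.1 0
          if blocked = 0 then (nx, ny) else (x, y)
        else (x, y)
      | none => (x, y)           -- delta[d] raises KeyError: outside Pre_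
    | none => (x, y)
  | _ => (x, y)

def solution_alt (park : List String) (routes : List String) : List Int :=
  let rows : Int := park.length
  let cols : Int := PySem.Str.len park.headI       -- len(park[0]); park ≠ [] inside Pre_
  let start := pvFindSB park 0 (0, 0)
  let rowpre := park.map (fun row => pvPrefix row.toList)
  let colpre := (pvTranspose (park.map String.toList)).map pvPrefix
  let p := routes.foldl (fun (st : Int × Int) r => pvRouteB rowpre colpre rows cols st.1 st.2 r) start
  [p.1, p.2]

-- ===== PRECONDITION & SPEC =====

def pvRouteOk (r : String) : Bool :=
  match PySem.Str.split? r " " with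
  | some [d, b] =>
    (decide (d = "E") || decide (d = "W") || decide (d = "S") || decide (d = "N")) &&
    (match PySem.Int.ofStr? b with | some n => decide (0 ≤ n) | none => false)
  | _ => false

-- Pre_ excludes inputs on which A raises (no 'S' at all: NameError; malformed route: ValueError;
-- with routes to walk, a ragged park can raise IndexError, so rectangularity is required unless
-- routes is empty) and one corner where A still returns a value: routes outside the natural
-- 'D n with n ≥ 0' format (on 'E -1' A moves backwards without any bounds/obstacle check,
-- on 'Q 0' it silently ignores the unknown direction while B's dict lookup raises).
def Pre_solution (park : List String) (routes : List String) : Prop :=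
  park ≠ [] ∧
  (∃ row ∈ park, 'S' ∈ row.toList) ∧
  (∀ r ∈ routes, pvRouteOk r = true) ∧
  (routes = [] ∨ ∀ row ∈ park, row.toList.length = park.headI.toList.length)

instance (park : List String) (routes : List String) : Decidable (Pre_solution park routes) := by
  unfold Pre_solution; infer_instance

def pvWitness_solution : List String × List String := (["SO", "OO"], ["E 1"])

def Spec_solution (park : List String) (routes : List String) (out : List Int) : Prop := out = solution_alt park routes
instance (park : List String) (routes : List String) (out : List Int) : Decidable (Spec_solution park routes out) := by unfold Spec_solution; infer_instance

-- ===== CLAIM (what is proved, stated in full; the proofs are below) =====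
def Claim_equal_solution : Prop := ∀ (park : List String) (routes : List String), Dom_solution park routes → Pre_solution park routes → Spec_solution park routes (solution park routes)

-- ===== LEMMAS AND PROOFS =====

theorem pvFindRowA_eq (cs : List Char) (j : Int) :
    pvFindRowA cs j = (PySem.List.index? cs 'S').map (fun k => j + (k : Int)) := by
  induction cs generalizing j with
  | nil => simp [pvFindRowA, PySem.List.index?]
  | cons c rest ih =>
    by_cases h : c = 'S'
    · subst h
      rw [pvFindRowA, if_pos rfl, PySem.List.index?_cons_self]
      simp
    · rw [pvFindRowA, if_neg h, ih, PySem.List.index?_cons_of_ne _ h]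
      cases PySem.List.index? rest 'S'
      · simp
      · simp
        ring

theorem pvFind_go_eq (cs : List Char) (m : Nat) :
    PySem.Chars.find.go ['S'] cs m =
      (match PySem.List.index? cs 'S' with
       | some k => ((m + k : Nat) : Int)
       | none => -1) := by
  induction cs generalizing m with
  | nil => simp [PySem.Chars.find.go, PySem.List.index?]
  | cons c rest ih =>
    rw [PySem.Chars.find.go.eq_2]
    by_cases h : c = 'S'
    · subst h
      rw [PySem.List.index?_cons_self]
      simp [List.isPrefixOf]
    · have hpre : List.isPrefixOf ['S'] (c :: rest) = false := by
        simp [List.isPrefixOf]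
        intro hh; exact h hh.symm
      rw [hpre, if_neg (by simp), ih, PySem.List.index?_cons_of_ne _ h]
      cases PySem.List.index? rest 'S'
      · simp
      · simp
        ring

theorem pvFind_eq_index? (cs : List Char) :
    PySem.Chars.find cs ['S'] =
      (match PySem.List.index? cs 'S' with
       | some k => (k : Int)
       | none => -1) := by
  rw [PySem.Chars.find, pvFind_go_eq]
  cases PySem.List.index? cs 'S' <;> simp

theorem pvFindSA_no_S (rows : List String) (i : Int) (st : Option (Int × Int))
    (h : ∀ row ∈ rows, 'S' ∉ row.toList) : pvFindSA rows i st = st := by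
  induction rows generalizing i st with
  | nil => rfl
  | cons row rest ih =>
    have hrow : 'S' ∉ row.toList := h row (by simp)
    have : PySem.List.index? row.toList 'S' = none := (PySem.List.index?_eq_none_iff _ _).mpr hrow
    rw [pvFindSA, pvFindRowA_eq, this]
    exact ih (i + 1) st (fun r hr => h r (by simp [hr]))

theorem pvFindSB_no_S (rows : List String) (i : Int) (st : Int × Int)
    (h : ∀ row ∈ rows, 'S' ∉ row.toList) : pvFindSB rows i st = st := by
  induction rows generalizing i st with
  | nil => rfl
  | cons row rest ih =>
    have hrow : 'S' ∉ row.toList := h row (by simp)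
    have hidx : PySem.List.index? row.toList 'S' = none :=
      (PySem.List.index?_eq_none_iff _ _).mpr hrow
    have hfind : PySem.Str.find row "S" = PySem.Chars.find row.toList ['S'] := by
      rw [PySem.Str.find_eq]; rfl
    rw [pvFindSB]
    show pvFindSB rest (i + 1) (if PySem.Str.find row "S" ≠ -1 then _ else st) = st
    rw [hfind, pvFind_eq_index?, hidx]
    simp only [ne_eq, not_true_eq_false, if_false]
    exact ih (i + 1) st (fun r hr => h r (by simp [hr]))

-- with at least one 'S' somewhere, both scans land on the LAST row containing 'S'
-- (A's break only leaves the inner loop; B simply never breaks), at its first 'S'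
theorem pvFindS_eq (park : List String) :
    ∀ (i : Int) (stA : Option (Int × Int)) (stB : Int × Int),
    (∃ row ∈ park, 'S' ∈ row.toList) →
    ∃ x y, pvFindSA park i stA = some (x, y) ∧ pvFindSB park i stB = (x, y) ∧
      i ≤ x ∧ x < i + park.length ∧ 0 ≤ y ∧
      ∃ row ∈ park, (y : Int) < row.toList.length := by
  induction park with
  | nil => intro i stA stB h; simp at h
  | cons row rest ih =>
    intro i stA stB h
    have hfind : PySem.Str.find row "S" = PySem.Chars.find row.toList ['S'] := by
      rw [PySem.Str.find_eq]; rfl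
    by_cases hc : 'S' ∈ row.toList
    case pos =>
      obtain ⟨k, hk⟩ := Option.isSome_iff_exists.mp ((PySem.List.index?_isSome_iff _ _).mpr hc)
      obtain ⟨hklen, -, -⟩ := PySem.List.getElem_of_index?_eq_some hk
      have hA1 : pvFindSA (row :: rest) i stA = pvFindSA rest (i + 1) (some (i, (k : Int))) := by
        rw [pvFindSA, pvFindRowA_eq, hk]
        show pvFindSA rest (i + 1) (some (i, 0 + (k : Int))) = _
        rw [zero_add]
      have hB1 : pvFindSB (row :: rest) i stB = pvFindSB rest (i + 1) (i, (k : Int)) := by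
        rw [pvFindSB]
        show pvFindSB rest (i + 1) (if PySem.Str.find row "S" ≠ -1 then (i, PySem.Str.find row "S") else stB) = _
        rw [hfind, pvFind_eq_index?, hk]
        simp
      by_cases hr : ∃ r' ∈ rest, 'S' ∈ r'.toList
      · obtain ⟨x, y, h1, h2, h3, h4, h5, r', hr', hy⟩ :=
          ih (i + 1) (some (i, (k : Int))) (i, (k : Int)) hr
        exact ⟨x, y, by rwa [hA1], by rwa [hB1], by omega,
          by simp only [List.length_cons]; push_cast; omega, h5, r', by simp [hr'], hy⟩
      · have hnone : ∀ r' ∈ rest, 'S' ∉ r'.toList := by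
          intro r' hr'
          exact fun hmem => hr ⟨r', hr', hmem⟩
        refine ⟨i, (k : Int), ?_, ?_, le_refl _,
          by simp only [List.length_cons]; push_cast; omega, by omega, row, by simp,
          by exact_mod_cast hklen⟩
        · rw [hA1]; exact pvFindSA_no_S rest (i + 1) _ hnone
        · rw [hB1]; exact pvFindSB_no_S rest (i + 1) _ hnone
    case neg =>
      have hidx : PySem.List.index? row.toList 'S' = none :=
        (PySem.List.index?_eq_none_iff _ _).mpr hc
      have hA1 : pvFindSA (row :: rest) i stA = pvFindSA rest (i + 1) stA := by
        rw [pvFindSA, pvFindRowA_eq, hidx]; rfl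
      have hB1 : pvFindSB (row :: rest) i stB = pvFindSB rest (i + 1) stB := by
        rw [pvFindSB]
        show pvFindSB rest (i + 1) (if PySem.Str.find row "S" ≠ -1 then (i, PySem.Str.find row "S") else stB) = _
        rw [hfind, pvFind_eq_index?, hidx]
        simp
      have hr : ∃ r' ∈ rest, 'S' ∈ r'.toList := by
        obtain ⟨r', hr', hmem⟩ := h
        rcases List.mem_cons.mp hr' with rfl | hmem'
        · exact absurd hmem hc
        · exact ⟨r', hmem', hmem⟩
      obtain ⟨x, y, h1, h2, h3, h4, h5, r', hr', hy⟩ := ih (i + 1) stA stB hr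
      exact ⟨x, y, by rwa [hA1], by rwa [hB1], by omega,
        by simp only [List.length_cons]; push_cast; omega, h5, r', by simp [hr'], hy⟩

theorem pvGet?_eq_pyGetD {α : Type} (xs : List α) (i : Int) (d : α)
    (h0 : 0 ≤ i) (h1 : i < xs.length) :
    PySem.List.pyGet? xs i = some (PySem.List.pyGetD xs i d) := by
  rw [PySem.List.pyGet?_eq_some_getElem xs h0 h1, PySem.List.pyGetD_eq_getElem xs d h0 h1]

-- park[a][b] on in-range indices (never out of range inside the proofs below)
def pvCell (park : List String) (a b : Int) : Char :=
  PySem.List.pyGetD (PySem.List.pyGetD park a "").toList b ' '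

-- A's inner loop, characterised: true iff every step's cell is in bounds and not 'X'
theorem pvStepA_iff (park : List String) (d : String) (dx dy x y n : Int) (hn : 0 ≤ n)
    (hrect : ∀ row ∈ park, row.toList.length = park.headI.toList.length)
    (hpos : ∀ j : Int,
      (if d = "E" then (x, y + j) else if d = "W" then (x, y - j)
       else if d = "S" then (x + j, y) else if d = "N" then (x - j, y) else (x, y))
        = (x + dx * j, y + dy * j)) :
    (pvStepA park park.length (park.headI.toList.length) d x y n.toNat 1 = true ↔
      ∀ k : Int, 1 ≤ k → k ≤ n →
        (0 ≤ x + dx * k ∧ x + dx * k < park.length ∧ 0 ≤ y + dy * k ∧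
          y + dy * k < park.headI.toList.length) ∧
        pvCell park (x + dx * k) (y + dy * k) ≠ 'X') := by
  have gen : ∀ (fuel : Nat) (j : Int),
      (pvStepA park park.length (park.headI.toList.length) d x y fuel j = true ↔
        ∀ k : Int, j ≤ k → k < j + fuel →
          (0 ≤ x + dx * k ∧ x + dx * k < park.length ∧ 0 ≤ y + dy * k ∧
            y + dy * k < park.headI.toList.length) ∧
          pvCell park (x + dx * k) (y + dy * k) ≠ 'X') := by
    intro fuel
    induction fuel with
    | zero =>
      intro j
      simp only [pvStepA, true_iff]
      intro k hk1 hk2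
      omega
    | succ fuel ih =>
      intro j
      rw [pvStepA, hpos j]
      by_cases hb : 0 ≤ x + dx * j ∧ x + dx * j < (park.length : Int) ∧ 0 ≤ y + dy * j ∧
          y + dy * j < (park.headI.toList.length : Int)
      · obtain ⟨h1, h2, h3, h4⟩ := hb
        rw [if_pos (by exact ⟨h1, h2, h3, h4⟩)]
        have hrow := pvGet?_eq_pyGetD park (x + dx * j) "" h1 h2
        rw [hrow]
        dsimp only
        have hmem : PySem.List.pyGetD park (x + dx * j) "" ∈ park := by
          rw [PySem.List.pyGetD_eq_getElem park "" h1 h2]; exact List.getElem_mem _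
        have hlen : ((PySem.List.pyGetD park (x + dx * j) "").toList.length : Int)
            = (park.headI.toList.length : Int) := by
          exact congrArg Nat.cast (hrect _ hmem)
        have hcell := pvGet?_eq_pyGetD (PySem.List.pyGetD park (x + dx * j) "").toList
          (y + dy * j) ' ' h3 (by rw [hlen]; exact h4)
        rw [hcell]
        dsimp only
        by_cases hX : PySem.List.pyGetD (PySem.List.pyGetD park (x + dx * j) "").toList
            (y + dy * j) ' ' = 'X'
        · rw [if_pos hX]
          simp only [Bool.false_eq_true, false_iff]
          intro hall
          exact (hall j le_rfl (by omega)).2 hX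
        · rw [if_neg hX]
          rw [ih (j + 1)]
          constructor
          · intro hall k hk1 hk2
            rcases eq_or_lt_of_le hk1 with rfl | hlt
            · exact ⟨⟨h1, h2, h3, h4⟩, hX⟩
            · exact hall k (by omega) (by omega)
          · intro hall k hk1 hk2
            exact hall k (by omega) (by omega)
      · rw [if_neg hb]
        simp only [Bool.false_eq_true, false_iff]
        intro hall
        exact hb (hall j le_rfl (by omega)).1
  rw [gen n.toNat 1]
  constructor
  · intro hall k hk1 hk2
    exact hall k hk1 (by omega)
  · intro hall k hk1 hk2
    exact hall k hk1 (by omega)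

-- ---- prefix-table characterisation ----

theorem pvPrefixGo_length (cs : List Char) (t : Int) :
    (pvPrefixGo cs t).length = cs.length := by
  induction cs generalizing t with
  | nil => rfl
  | cons c rest ih => simp [pvPrefixGo, ih]

theorem pvPrefixGo_getD (cs : List Char) (t : Int) (k : Nat) (hk : k < cs.length) :
    (pvPrefixGo cs t).getD k 0 =
      t + ((cs.take (k + 1)).countP (fun c => c = 'X') : Int) := by
  induction cs generalizing t k with
  | nil => simp at hk
  | cons c rest ih =>
    cases k with
    | zero =>
      show t + (if c = 'X' then 1 else 0) = _
      simp only [List.take_succ_cons, List.take_zero, List.countP_cons, List.countP_nil]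
      by_cases h : c = 'X' <;> simp [h]
    | succ k =>
      have hk' : k < rest.length := by simpa using hk
      simp only [pvPrefixGo, List.getD_cons_succ]
      rw [ih _ k hk']
      simp only [List.take_succ_cons, List.countP_cons]
      by_cases h : c = 'X'
      · simp only [h, decide_true, if_true]
        push_cast
        ring
      · simp only [h, decide_false, if_false]
        push_cast
        ring

-- the prefix list at a Nat index, as a count over a take
theorem pvPrefix_getD (cs : List Char) (k : Nat) (hk : k ≤ cs.length) :
    (pvPrefix cs).getD k 0 = ((cs.take k).countP (fun c => c = 'X') : Int) := by
  cases k with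
  | zero => simp [pvPrefix]
  | succ k =>
    show (pvPrefixGo cs 0).getD k 0 = _
    rw [pvPrefixGo_getD cs 0 k (by omega)]
    ring

-- pyGetD into the prefix list, as a count over a take
theorem pvPrefix_at (cs : List Char) (i : Int) (h0 : 0 ≤ i) (h1 : i ≤ cs.length) :
    PySem.List.pyGetD (pvPrefix cs) i 0 =
      ((cs.take i.toNat).countP (fun c => c = 'X') : Int) := by
  have hlen : (pvPrefix cs).length = cs.length + 1 := by
    simp [pvPrefix, pvPrefixGo_length]
  have hlt : i.toNat < (pvPrefix cs).length := by rw [hlen]; omega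
  rw [PySem.List.pyGetD_eq_getElem _ 0 h0 (by omega)]
  have h2 := pvPrefix_getD cs i.toNat (by omega)
  rw [List.getD_eq_getElem _ _ hlt] at h2
  exact h2

-- membership in the drop/take segment
theorem pvMem_seg_iff (R : List Char) (a b : Int) (h0 : 0 ≤ a) (h0b : 0 ≤ b)
    (hbl : b ≤ R.length) (c : Char) :
    c ∈ (R.drop a.toNat).take (b.toNat - a.toNat) ↔
      ∃ i : Int, a ≤ i ∧ i < b ∧ PySem.List.pyGetD R i ' ' = c := by
  by_cases hab : a ≤ b
  · rw [List.mem_iff_getElem?]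
    constructor
    · rintro ⟨j, hj⟩
      rw [List.getElem?_take] at hj
      split at hj
      · rw [List.getElem?_drop] at hj
        rw [List.getElem?_eq_some_iff] at hj
        obtain ⟨hlt, hval⟩ := hj
        refine ⟨a + j, by omega, by omega, ?_⟩
        rw [PySem.List.pyGetD_eq_getElem R ' ' (by omega) (by omega)]
        rw [← hval]
        congr 1
        omega
      · simp at hj
    · rintro ⟨i, hi1, hi2, hval⟩
      refine ⟨(i - a).toNat, ?_⟩
      rw [List.getElem?_take, if_pos (by omega), List.getElem?_drop]
      rw [PySem.List.pyGetD_eq_getElem R ' ' (by omega) (by omega)] at hval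
      rw [List.getElem?_eq_some_iff]
      refine ⟨by omega, ?_⟩
      rw [← hval]
      congr 1
      omega
  · rw [show b.toNat - a.toNat = 0 by omega]
    simp
    intro i h1 h2
    omega

-- the prefix difference is zero iff no 'X' occupies positions [a, b) of cs
theorem pvDiffZero (cs : List Char) (a b : Int) (h0 : 0 ≤ a) (hab : a ≤ b)
    (hb : b ≤ cs.length) :
    (PySem.List.pyGetD (pvPrefix cs) b 0 - PySem.List.pyGetD (pvPrefix cs) a 0 = 0) ↔
      ∀ i : Int, a ≤ i → i < b → PySem.List.pyGetD cs i ' ' ≠ 'X' := by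
  rw [pvPrefix_at cs a h0 (by omega), pvPrefix_at cs b (by omega) hb]
  have hsplit : cs.take b.toNat = cs.take a.toNat ++ (cs.drop a.toNat).take (b.toNat - a.toNat) := by
    rw [← List.take_add]
    congr 1
    omega
  rw [hsplit, List.countP_append]
  push_cast
  rw [show ((cs.take a.toNat).countP (fun c => decide (c = 'X')) : Int) +
      (((cs.drop a.toNat).take (b.toNat - a.toNat)).countP (fun c => decide (c = 'X')) : Int) -
      ((cs.take a.toNat).countP (fun c => decide (c = 'X')) : Int) =
      (((cs.drop a.toNat).take (b.toNat - a.toNat)).countP (fun c => decide (c = 'X')) : Int) by ring]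
  rw [show ((((cs.drop a.toNat).take (b.toNat - a.toNat)).countP (fun c => decide (c = 'X')) : Int) = 0) ↔
      (((cs.drop a.toNat).take (b.toNat - a.toNat)).countP (fun c => decide (c = 'X')) = 0) by
    constructor <;> intro h <;> [exact_mod_cast h; exact_mod_cast h]]
  rw [List.countP_eq_zero]
  constructor
  · intro h i hi1 hi2 hX
    have hmem : 'X' ∈ (cs.drop a.toNat).take (b.toNat - a.toNat) :=
      (pvMem_seg_iff cs a b h0 (by omega) hb 'X').mpr ⟨i, hi1, hi2, hX⟩
    simpa using h 'X' hmem
  · intro h c hc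
    obtain ⟨i, hi1, hi2, hval⟩ := (pvMem_seg_iff cs a b h0 (by omega) hb c).mp hc
    simp only [decide_eq_true_eq]
    intro rfl_c
    exact h i hi1 hi2 (by rw [hval, rfl_c])

-- ---- the concrete prefix tables of solution_alt ----

-- rowpre[x] is the prefix list of row x
theorem pvRowpre_at (park : List String) (x : Int) (h0 : 0 ≤ x) (h1 : x < park.length) :
    PySem.List.pyGetD (park.map (fun row => pvPrefix row.toList)) x [] =
      pvPrefix (PySem.List.pyGetD park x "").toList := by
  rw [PySem.List.pyGetD_eq_getElem _ [] h0 (by simpa using h1),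
      PySem.List.pyGetD_eq_getElem park "" h0 h1]
  simp

-- the column list at y (the proofs use only its cells and length)
def pvCol (park : List String) (y : Int) : List Char :=
  park.map (fun s => s.toList.getD y.toNat ' ')

theorem pvCol_cell (park : List String) (y i : Int) (h0 : 0 ≤ i) (h1 : i < park.length)
    (hy : 0 ≤ y) :
    PySem.List.pyGetD (pvCol park y) i ' ' = pvCell park i y := by
  unfold pvCol pvCell
  rw [PySem.List.pyGetD_eq_getElem _ ' ' h0 (by simpa using h1),
      PySem.List.pyGetD_eq_getElem park "" h0 h1]
  simp only [List.getElem_map]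
  rw [PySem.List.pyGetD_of_nonneg]
  exact hy

theorem pvFoldMin_const (rest : List String) (C : Nat)
    (h : ∀ r ∈ rest, r.toList.length = C) :
    rest.foldl (fun acc (r : String) => min acc r.toList.length) C = C := by
  induction rest with
  | nil => rfl
  | cons r rs ih =>
    simp only [List.foldl_cons]
    rw [h r (by simp), min_self]
    exact ih (fun r' hr' => h r' (by simp [hr']))

-- colpre[y] is the prefix list of column y (rectangular park)
theorem pvColpre_at (park : List String) (y : Int)
    (hne : park ≠ [])
    (hrect : ∀ row ∈ park, row.toList.length = park.headI.toList.length)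
    (h0 : 0 ≤ y) (h1 : y < (park.headI.toList.length : Int)) :
    PySem.List.pyGetD ((pvTranspose (park.map String.toList)).map pvPrefix) y [] =
      pvPrefix (pvCol park y) := by
  obtain ⟨r0, rest, rfl⟩ : ∃ r0 rest, park = r0 :: rest := by
    cases park with
    | nil => exact absurd rfl hne
    | cons a b => exact ⟨a, b, rfl⟩
  have hC : ∀ r ∈ rest, r.toList.length = r0.toList.length := by
    intro r hr
    exact hrect r (by simp [hr])
  have htr : pvTranspose ((r0 :: rest).map String.toList) =
      (List.range r0.toList.length).map
        (fun j => (r0 :: rest).map (fun s => s.toList.getD j ' ')) := by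
    unfold pvTranspose
    simp only [List.map_cons]
    have hm : (rest.map String.toList).foldl (fun acc r => min acc r.length)
        r0.toList.length = r0.toList.length := by
      rw [List.foldl_map]
      exact pvFoldMin_const rest r0.toList.length hC
    rw [hm]
    congr 1
    funext j
    simp [List.map_map]
  rw [htr]
  have hylen : y.toNat < r0.toList.length := by
    simp only [List.headI_cons] at h1
    omega
  rw [PySem.List.pyGetD_eq_getElem _ [] h0 (by simp only [List.length_map, List.length_range]; omega)]
  simp only [List.getElem_map, List.getElem_range]
  unfold pvCol
  rfl

-- ---- per-direction equivalence of B's O(1) test with A's per-cell condition ----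

theorem pvSegE (park : List String) (x y n : Int)
    (hrect : ∀ row ∈ park, row.toList.length = park.headI.toList.length)
    (hx : 0 ≤ x ∧ x < (park.length : Int))
    (hy : 0 ≤ y ∧ y < (park.headI.toList.length : Int)) (hn : 0 ≤ n) :
    ((0 ≤ x ∧ x < (park.length : Int) ∧ 0 ≤ y + n ∧ y + n < (park.headI.toList.length : Int)) ∧
      PySem.List.pyGetD (pvPrefix (PySem.List.pyGetD park x "").toList) (y + n + 1) 0 -
        PySem.List.pyGetD (pvPrefix (PySem.List.pyGetD park x "").toList) (y + 1) 0 = 0)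
      ↔
    (∀ k : Int, 1 ≤ k → k ≤ n →
      (0 ≤ x + 0 * k ∧ x + 0 * k < (park.length : Int) ∧ 0 ≤ y + 1 * k ∧
        y + 1 * k < (park.headI.toList.length : Int)) ∧
      pvCell park (x + 0 * k) (y + 1 * k) ≠ 'X') := by
  have hR : ((PySem.List.pyGetD park x "").toList.length : Int) = (park.headI.toList.length : Int) := by
    have hmem : PySem.List.pyGetD park x "" ∈ park := by
      rw [PySem.List.pyGetD_eq_getElem park "" hx.1 hx.2]; exact List.getElem_mem _
    exact congrArg Nat.cast (hrect _ hmem)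
  constructor
  · rintro ⟨⟨-, -, -, hdest⟩, hdiff⟩ k hk1 hk2
    refine ⟨⟨by omega, by omega, by omega, by omega⟩, ?_⟩
    have := (pvDiffZero _ (y + 1) (y + n + 1) (by omega) (by omega) (by omega)).mp hdiff
      (y + 1 * k) (by omega) (by omega)
    intro hX
    exact this (by simpa [pvCell, show x + 0 * k = x by ring] using hX)
  · intro hp
    have hdest : 0 ≤ x ∧ x < (park.length : Int) ∧ 0 ≤ y + n ∧
        y + n < (park.headI.toList.length : Int) := by
      rcases eq_or_lt_of_le hn with rfl | hpos
      · exact ⟨hx.1, hx.2, by omega, by omega⟩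
      · have := (hp n (by omega) le_rfl).1
        exact ⟨hx.1, hx.2, by omega, by omega⟩
    refine ⟨hdest, ?_⟩
    rw [pvDiffZero _ (y + 1) (y + n + 1) (by omega) (by omega) (by omega)]
    intro i hi1 hi2 hX
    refine (hp (i - y) (by omega) (by omega)).2 ?_
    show PySem.List.pyGetD (PySem.List.pyGetD park (x + 0 * (i - y)) "").toList (y + 1 * (i - y)) ' ' = 'X'
    rw [show x + 0 * (i - y) = x by ring, show y + 1 * (i - y) = i by ring]
    exact hX

theorem pvSegW (park : List String) (x y n : Int)
    (hrect : ∀ row ∈ park, row.toList.length = park.headI.toList.length)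
    (hx : 0 ≤ x ∧ x < (park.length : Int))
    (hy : 0 ≤ y ∧ y < (park.headI.toList.length : Int)) (hn : 0 ≤ n) :
    ((0 ≤ x ∧ x < (park.length : Int) ∧ 0 ≤ y - n ∧ y - n < (park.headI.toList.length : Int)) ∧
      PySem.List.pyGetD (pvPrefix (PySem.List.pyGetD park x "").toList) y 0 -
        PySem.List.pyGetD (pvPrefix (PySem.List.pyGetD park x "").toList) (y - n) 0 = 0)
      ↔
    (∀ k : Int, 1 ≤ k → k ≤ n →
      (0 ≤ x + 0 * k ∧ x + 0 * k < (park.length : Int) ∧ 0 ≤ y + -1 * k ∧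
        y + -1 * k < (park.headI.toList.length : Int)) ∧
      pvCell park (x + 0 * k) (y + -1 * k) ≠ 'X') := by
  have hR : ((PySem.List.pyGetD park x "").toList.length : Int) = (park.headI.toList.length : Int) := by
    have hmem : PySem.List.pyGetD park x "" ∈ park := by
      rw [PySem.List.pyGetD_eq_getElem park "" hx.1 hx.2]; exact List.getElem_mem _
    exact congrArg Nat.cast (hrect _ hmem)
  constructor
  · rintro ⟨⟨-, -, hdest, -⟩, hdiff⟩ k hk1 hk2
    refine ⟨⟨by omega, by omega, by omega, by omega⟩, ?_⟩
    have := (pvDiffZero _ (y - n) y (by omega) (by omega) (by omega)).mp hdiff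
      (y + -1 * k) (by omega) (by omega)
    intro hX
    exact this (by simpa [pvCell, show x + 0 * k = x by ring] using hX)
  · intro hp
    have hdest : 0 ≤ x ∧ x < (park.length : Int) ∧ 0 ≤ y - n ∧
        y - n < (park.headI.toList.length : Int) := by
      rcases eq_or_lt_of_le hn with rfl | hpos
      · exact ⟨hx.1, hx.2, by omega, by omega⟩
      · have := (hp n (by omega) le_rfl).1
        exact ⟨hx.1, hx.2, by omega, by omega⟩
    refine ⟨hdest, ?_⟩
    rw [pvDiffZero _ (y - n) y (by omega) (by omega) (by omega)]
    intro i hi1 hi2 hX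
    refine (hp (y - i) (by omega) (by omega)).2 ?_
    show PySem.List.pyGetD (PySem.List.pyGetD park (x + 0 * (y - i)) "").toList (y + -1 * (y - i)) ' ' = 'X'
    rw [show x + 0 * (y - i) = x by ring, show y + -1 * (y - i) = i by ring]
    exact hX

theorem pvSegS (park : List String) (x y n : Int)
    (hx : 0 ≤ x ∧ x < (park.length : Int))
    (hy : 0 ≤ y ∧ y < (park.headI.toList.length : Int)) (hn : 0 ≤ n) :
    ((0 ≤ x + n ∧ x + n < (park.length : Int) ∧ 0 ≤ y ∧ y < (park.headI.toList.length : Int)) ∧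
      PySem.List.pyGetD (pvPrefix (pvCol park y)) (x + n + 1) 0 -
        PySem.List.pyGetD (pvPrefix (pvCol park y)) (x + 1) 0 = 0)
      ↔
    (∀ k : Int, 1 ≤ k → k ≤ n →
      (0 ≤ x + 1 * k ∧ x + 1 * k < (park.length : Int) ∧ 0 ≤ y + 0 * k ∧
        y + 0 * k < (park.headI.toList.length : Int)) ∧
      pvCell park (x + 1 * k) (y + 0 * k) ≠ 'X') := by
  have hlen : ((pvCol park y).length : Int) = (park.length : Int) := by
    simp [pvCol]
  constructor
  · rintro ⟨⟨-, hdest, -, -⟩, hdiff⟩ k hk1 hk2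
    refine ⟨⟨by omega, by omega, by omega, by omega⟩, ?_⟩
    have := (pvDiffZero _ (x + 1) (x + n + 1) (by omega) (by omega) (by omega)).mp hdiff
      (x + 1 * k) (by omega) (by omega)
    intro hX
    apply this
    rw [pvCol_cell park y (x + 1 * k) (by omega) (by omega) hy.1]
    rw [show y + 0 * k = y by ring] at hX
    exact hX
  · intro hp
    have hdest : 0 ≤ x + n ∧ x + n < (park.length : Int) ∧ 0 ≤ y ∧
        y < (park.headI.toList.length : Int) := by
      rcases eq_or_lt_of_le hn with rfl | hpos
      · exact ⟨by omega, by omega, hy.1, hy.2⟩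
      · have := (hp n (by omega) le_rfl).1
        exact ⟨by omega, by omega, hy.1, hy.2⟩
    refine ⟨hdest, ?_⟩
    rw [pvDiffZero _ (x + 1) (x + n + 1) (by omega) (by omega) (by omega)]
    intro i hi1 hi2 hX
    rw [pvCol_cell park y i (by omega) (by omega) hy.1] at hX
    refine (hp (i - x) (by omega) (by omega)).2 ?_
    rw [show x + 1 * (i - x) = i by ring, show y + 0 * (i - x) = y by ring]
    exact hX

theorem pvSegN (park : List String) (x y n : Int)
    (hx : 0 ≤ x ∧ x < (park.length : Int))
    (hy : 0 ≤ y ∧ y < (park.headI.toList.length : Int)) (hn : 0 ≤ n) :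
    ((0 ≤ x - n ∧ x - n < (park.length : Int) ∧ 0 ≤ y ∧ y < (park.headI.toList.length : Int)) ∧
      PySem.List.pyGetD (pvPrefix (pvCol park y)) x 0 -
        PySem.List.pyGetD (pvPrefix (pvCol park y)) (x - n) 0 = 0)
      ↔
    (∀ k : Int, 1 ≤ k → k ≤ n →
      (0 ≤ x + -1 * k ∧ x + -1 * k < (park.length : Int) ∧ 0 ≤ y + 0 * k ∧
        y + 0 * k < (park.headI.toList.length : Int)) ∧
      pvCell park (x + -1 * k) (y + 0 * k) ≠ 'X') := by
  have hlen : ((pvCol park y).length : Int) = (park.length : Int) := by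
    simp [pvCol]
  constructor
  · rintro ⟨⟨hdest, -, -, -⟩, hdiff⟩ k hk1 hk2
    refine ⟨⟨by omega, by omega, by omega, by omega⟩, ?_⟩
    have := (pvDiffZero _ (x - n) x (by omega) (by omega) (by omega)).mp hdiff
      (x + -1 * k) (by omega) (by omega)
    intro hX
    apply this
    rw [pvCol_cell park y (x + -1 * k) (by omega) (by omega) hy.1]
    rw [show y + 0 * k = y by ring] at hX
    exact hX
  · intro hp
    have hdest : 0 ≤ x - n ∧ x - n < (park.length : Int) ∧ 0 ≤ y ∧
        y < (park.headI.toList.length : Int) := by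
      rcases eq_or_lt_of_le hn with rfl | hpos
      · exact ⟨by omega, by omega, hy.1, hy.2⟩
      · have := (hp n (by omega) le_rfl).1
        exact ⟨by omega, by omega, hy.1, hy.2⟩
    refine ⟨hdest, ?_⟩
    rw [pvDiffZero _ (x - n) x (by omega) (by omega) (by omega)]
    intro i hi1 hi2 hX
    rw [pvCol_cell park y i (by omega) (by omega) hy.1] at hX
    refine (hp (x - i) (by omega) (by omega)).2 ?_
    rw [show x + -1 * (x - i) = i by ring, show y + 0 * (x - i) = y by ring]
    exact hX

theorem pvRoute_eq (park : List String) (x y : Int) (r : String)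
    (hne : park ≠ [])
    (hrect : ∀ row ∈ park, row.toList.length = park.headI.toList.length)
    (hx : 0 ≤ x ∧ x < (park.length : Int))
    (hy : 0 ≤ y ∧ y < (park.headI.toList.length : Int))
    (hr : pvRouteOk r = true) :
    pvRouteA park park.length (park.headI.toList.length) x y r
      = pvRouteB (park.map (fun row => pvPrefix row.toList))
          ((pvTranspose (park.map String.toList)).map pvPrefix)
          park.length (park.headI.toList.length) x y r := by
  unfold pvRouteOk at hr
  unfold pvRouteA pvRouteB
  cases hsplit : PySem.Str.split? r " " with
  | none => rw [hsplit] at hr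
  | some parts =>
    rw [hsplit] at hr
    match parts with
    | [] => rfl
    | [d] => rfl
    | d :: b :: c :: rest => rfl
    | [d, b] =>
      dsimp only at hr
      cases hof : PySem.Int.ofStr? b with
      | none => rw [hof] at hr; simp at hr
      | some n =>
        rw [hof] at hr
        simp only [Bool.and_eq_true, Bool.or_eq_true, decide_eq_true_eq] at hr
        obtain ⟨hd, hn⟩ := hr
        have hrow := pvRowpre_at park x hx.1 hx.2
        rcases hd with ((hd | hd) | hd) | hd <;> subst hd <;>
          (dsimp only; rw [hof]; dsimp only)
        · -- E
          have hA := pvStepA_iff park "E" 0 1 x y n hn hrect (by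
            intro j
            simp only [String.reduceEq, reduceIte, Prod.mk.injEq]
            constructor <;> ring)
          have hB := pvSegE park x y n hrect hx hy hn
          rw [show PySem.Dict.get? pvDelta "E" = some ((0 : Int), (1 : Int)) from rfl]
          dsimp only
          simp only [String.reduceEq, Int.reduceNeg, Int.reduceEq, reduceIte]
          rw [hrow]
          simp only [zero_mul, one_mul, add_zero]
          by_cases hk : (∀ k : Int, 1 ≤ k → k ≤ n →
              (0 ≤ x + 0 * k ∧ x + 0 * k < (park.length : Int) ∧ 0 ≤ y + 1 * k ∧
                y + 1 * k < (park.headI.toList.length : Int)) ∧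
              pvCell park (x + 0 * k) (y + 1 * k) ≠ 'X')
          · obtain ⟨hb, hdiff⟩ := hB.mpr hk
            rw [if_pos (hA.mpr hk), if_pos ⟨hb.1, hb.2.1, hb.2.2.1, hb.2.2.2⟩, if_pos hdiff]
          · rw [if_neg (by rw [hA]; exact hk)]
            by_cases hb : 0 ≤ x ∧ x < (park.length : Int) ∧ 0 ≤ y + n ∧
                y + n < (park.headI.toList.length : Int)
            · rw [if_pos hb]
              have hdiff : ¬ (PySem.List.pyGetD (pvPrefix (PySem.List.pyGetD park x "").toList) (y + n + 1) 0 -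
                  PySem.List.pyGetD (pvPrefix (PySem.List.pyGetD park x "").toList) (y + 1) 0 = 0) := by
                intro hz
                exact hk (hB.mp ⟨⟨hb.1, hb.2.1, hb.2.2.1, hb.2.2.2⟩, hz⟩)
              rw [if_neg hdiff]
            · rw [if_neg hb]
        · -- W
          have hA := pvStepA_iff park "W" 0 (-1) x y n hn hrect (by
            intro j
            simp only [String.reduceEq, reduceIte, Prod.mk.injEq]
            constructor <;> ring)
          have hB := pvSegW park x y n hrect hx hy hn
          rw [show PySem.Dict.get? pvDelta "W" = some ((0 : Int), (-1 : Int)) from rfl]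
          dsimp only
          simp only [String.reduceEq, Int.reduceNeg, Int.reduceEq, reduceIte]
          rw [hrow]
          simp only [zero_mul, add_zero, neg_mul, one_mul, ← sub_eq_add_neg]
          by_cases hk : (∀ k : Int, 1 ≤ k → k ≤ n →
              (0 ≤ x + 0 * k ∧ x + 0 * k < (park.length : Int) ∧ 0 ≤ y + -1 * k ∧
                y + -1 * k < (park.headI.toList.length : Int)) ∧
              pvCell park (x + 0 * k) (y + -1 * k) ≠ 'X')
          · obtain ⟨hb, hdiff⟩ := hB.mpr hk
            rw [if_pos (hA.mpr hk), if_pos ⟨hb.1, hb.2.1, hb.2.2.1, hb.2.2.2⟩, if_pos hdiff]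
          · rw [if_neg (by rw [hA]; exact hk)]
            by_cases hb : 0 ≤ x ∧ x < (park.length : Int) ∧ 0 ≤ y - n ∧
                y - n < (park.headI.toList.length : Int)
            · rw [if_pos hb]
              have hdiff : ¬ (PySem.List.pyGetD (pvPrefix (PySem.List.pyGetD park x "").toList) y 0 -
                  PySem.List.pyGetD (pvPrefix (PySem.List.pyGetD park x "").toList) (y - n) 0 = 0) := by
                intro hz
                exact hk (hB.mp ⟨⟨hb.1, hb.2.1, hb.2.2.1, hb.2.2.2⟩, hz⟩)
              rw [if_neg hdiff]
            · rw [if_neg hb]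
        · -- S
          have hcol := pvColpre_at park y hne hrect hy.1 hy.2
          have hA := pvStepA_iff park "S" 1 0 x y n hn hrect (by
            intro j
            simp only [String.reduceEq, reduceIte, Prod.mk.injEq]
            constructor <;> ring)
          have hB := pvSegS park x y n hx hy hn
          rw [show PySem.Dict.get? pvDelta "S" = some ((1 : Int), (0 : Int)) from rfl]
          dsimp only
          simp only [String.reduceEq, Int.reduceNeg, Int.reduceEq, one_ne_zero, reduceIte]
          rw [hcol]
          simp only [zero_mul, one_mul, add_zero]
          by_cases hk : (∀ k : Int, 1 ≤ k → k ≤ n →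
              (0 ≤ x + 1 * k ∧ x + 1 * k < (park.length : Int) ∧ 0 ≤ y + 0 * k ∧
                y + 0 * k < (park.headI.toList.length : Int)) ∧
              pvCell park (x + 1 * k) (y + 0 * k) ≠ 'X')
          · obtain ⟨hb, hdiff⟩ := hB.mpr hk
            rw [if_pos (hA.mpr hk), if_pos ⟨hb.1, hb.2.1, hb.2.2.1, hb.2.2.2⟩, if_pos hdiff]
          · rw [if_neg (by rw [hA]; exact hk)]
            by_cases hb : 0 ≤ x + n ∧ x + n < (park.length : Int) ∧ 0 ≤ y ∧
                y < (park.headI.toList.length : Int)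
            · rw [if_pos hb]
              have hdiff : ¬ (PySem.List.pyGetD (pvPrefix (pvCol park y)) (x + n + 1) 0 -
                  PySem.List.pyGetD (pvPrefix (pvCol park y)) (x + 1) 0 = 0) := by
                intro hz
                exact hk (hB.mp ⟨⟨hb.1, hb.2.1, hb.2.2.1, hb.2.2.2⟩, hz⟩)
              rw [if_neg hdiff]
            · rw [if_neg hb]
        · -- N
          have hcol := pvColpre_at park y hne hrect hy.1 hy.2
          have hA := pvStepA_iff park "N" (-1) 0 x y n hn hrect (by
            intro j
            simp only [String.reduceEq, reduceIte, Prod.mk.injEq]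
            constructor <;> ring)
          have hB := pvSegN park x y n hx hy hn
          rw [show PySem.Dict.get? pvDelta "N" = some ((-1 : Int), (0 : Int)) from rfl]
          dsimp only
          simp only [String.reduceEq, Int.reduceNeg, Int.reduceEq, neg_eq_zero, one_ne_zero, reduceIte]
          rw [hcol]
          simp only [neg_mul, one_mul, zero_mul, add_zero, ← sub_eq_add_neg]
          by_cases hk : (∀ k : Int, 1 ≤ k → k ≤ n →
              (0 ≤ x + -1 * k ∧ x + -1 * k < (park.length : Int) ∧ 0 ≤ y + 0 * k ∧
                y + 0 * k < (park.headI.toList.length : Int)) ∧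
              pvCell park (x + -1 * k) (y + 0 * k) ≠ 'X')
          · obtain ⟨hb, hdiff⟩ := hB.mpr hk
            rw [if_pos (hA.mpr hk), if_pos ⟨hb.1, hb.2.1, hb.2.2.1, hb.2.2.2⟩, if_pos hdiff]
          · rw [if_neg (by rw [hA]; exact hk)]
            by_cases hb : 0 ≤ x - n ∧ x - n < (park.length : Int) ∧ 0 ≤ y ∧
                y < (park.headI.toList.length : Int)
            · rw [if_pos hb]
              have hdiff : ¬ (PySem.List.pyGetD (pvPrefix (pvCol park y)) x 0 -
                  PySem.List.pyGetD (pvPrefix (pvCol park y)) (x - n) 0 = 0) := by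
                intro hz
                exact hk (hB.mp ⟨⟨hb.1, hb.2.1, hb.2.2.1, hb.2.2.2⟩, hz⟩)
              rw [if_neg hdiff]
            · rw [if_neg hb]

theorem pvRouteB_preserves (rowpre colpre : List (List Int)) (rows cols x y : Int) (r : String)
    (h : 0 ≤ x ∧ x < rows ∧ 0 ≤ y ∧ y < cols) :
    0 ≤ (pvRouteB rowpre colpre rows cols x y r).1 ∧
      (pvRouteB rowpre colpre rows cols x y r).1 < rows ∧
      0 ≤ (pvRouteB rowpre colpre rows cols x y r).2 ∧
      (pvRouteB rowpre colpre rows cols x y r).2 < cols := by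
  unfold pvRouteB
  cases PySem.Str.split? r " " with
  | none => exact h
  | some parts =>
    match parts with
    | [] => exact h
    | [d] => exact h
    | d :: b :: c :: rest => exact h
    | [d, b] =>
      dsimp only
      cases hof : PySem.Int.ofStr? b with
      | none => exact h
      | some n =>
        dsimp only
        cases hget : PySem.Dict.get? pvDelta d with
        | none => exact h
        | some dxy =>
          dsimp only
          by_cases hg : 0 ≤ x + dxy.1 * n ∧ x + dxy.1 * n < rows ∧ 0 ≤ y + dxy.2 * n ∧
              y + dxy.2 * n < cols
          · rw [if_pos hg]
            repeat' split
            all_goals first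
              | exact h
              | exact ⟨hg.1, hg.2.1, hg.2.2.1, hg.2.2.2⟩
          · rw [if_neg hg]; exact h

theorem pvFold_eq (park : List String)
    (hne : park ≠ [])
    (hrect : ∀ row ∈ park, row.toList.length = park.headI.toList.length) :
    ∀ (routes : List String) (x y : Int),
      0 ≤ x ∧ x < (park.length : Int) →
      0 ≤ y ∧ y < (park.headI.toList.length : Int) →
      (∀ r ∈ routes, pvRouteOk r = true) →
      routes.foldl (fun (st : Int × Int) r =>
          pvRouteA park park.length (park.headI.toList.length) st.1 st.2 r) (x, y)
        = routes.foldl (fun (st : Int × Int) r =>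
          pvRouteB (park.map (fun row => pvPrefix row.toList))
            ((pvTranspose (park.map String.toList)).map pvPrefix)
            park.length (park.headI.toList.length) st.1 st.2 r) (x, y) := by
  intro routes
  induction routes with
  | nil => intro x y _ _ _; rfl
  | cons r rest ih =>
    intro x y hx hy hok
    simp only [List.foldl_cons]
    rw [pvRoute_eq park x y r hne hrect hx hy (hok r (by simp))]
    have hpres := pvRouteB_preserves (park.map (fun row => pvPrefix row.toList))
      ((pvTranspose (park.map String.toList)).map pvPrefix)
      park.length (park.headI.toList.length) x y r ⟨hx.1, hx.2, hy.1, hy.2⟩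
    exact ih _ _ ⟨hpres.1, hpres.2.1⟩ ⟨hpres.2.2.1, hpres.2.2.2⟩
      (fun r' hr' => hok r' (by simp [hr']))

-- ===== VERDICT (by name: the statement is the Claim_ definition above) =====
theorem solution_spec : Claim_equal_solution := by
  intro park routes _ hpre
  obtain ⟨hne, hsrow, hroutes, hshape⟩ := hpre
  unfold Spec_solution solution solution_alt
  obtain ⟨x0, y0, hA, hB, h0x, h1x, h0y, row, hrow, hy⟩ := pvFindS_eq park 0 none (0, 0) hsrow
  rw [hA, hB]
  dsimp only
  rcases hshape with rfl | hrect
  · rfl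
  · have hlen : PySem.Str.len park.headI = (park.headI.toList.length : Int) := by
      rw [PySem.Str.len_eq]
    rw [hlen]
    have hycols : y0 < (park.headI.toList.length : Int) := by
      have := hrect row hrow
      omega
    rw [pvFold_eq park hne hrect routes x0 y0 ⟨h0x, by omega⟩ ⟨h0y, hycols⟩ hroutes]
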